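-- pv_equiv track=rewrite | github.com/JanSkoupil86/Streamlit-MVP | app.py | stat_categories_from_columns
-- ===== SOURCE A (Python) =====
-- from typing import List, Tuple, Dict
--
-- def stat_categories_from_columns(num_cols: List[str]) -> Dict[str, List[str]]:
--     """Very light heuristic buckets based on common keywords."""
--     def pick(*keys):
--         keys_low = [k.lower() for k in keys]
--         return [c for c in num_cols if any(k in c.lower() for k in keys_low)]
--
--     return {
--         "Comprehensive": num_cols[:20],  # first 20 numeric by order
--         "Shooting": pick("shot", "xg", "npxg", "goals", "sca", "gca"),
--         "Passing": pick("pass", "key pass", "assist", "xA", "cross", "prog pass"),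
--         "Possession/Progression": pick("carry", "progress", "dribble", "touch"),
--         "Defending": pick("tackle", "interception", "clearance", "block", "press", "aerial", "duel"),
--         "Goalkeeping": pick("save", "keeper", "ga", "psxg"),
--     }
-- ===== SOURCE B (Python) =====
-- from typing import List, Dict
--
-- _CATS = [
--     ("Shooting", ("shot", "xg", "npxg", "goals", "sca", "gca")),
--     ("Passing", ("pass", "key pass", "assist", "xa", "cross", "prog pass")),
--     ("Possession/Progression", ("carry", "progress", "dribble", "touch")),
--     ("Defending", ("tackle", "interception", "clearance", "block", "press", "aerial", "duel")),
--     ("Goalkeeping", ("save", "keeper", "ga", "psxg")),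
-- ]
--
-- def stat_categories_from_columns(num_cols: List[str]) -> Dict[str, List[str]]:
--     """Two staged passes: first tag every column once with the SET of category
--     names whose keywords occur in its lowercased name, then group the columns
--     per category by a plain set-membership test (no substring work)."""
--     tagged = []
--     for c in num_cols:
--         cl = c.lower()
--         tagged.append((c, {name for name, keys in _CATS if any(k in cl for k in keys)}))
--     result = {"Comprehensive": num_cols[:20]}
--     for name, _ in _CATS:
--         result[name] = [c for c, tags in tagged if name in tags]
--     return result
-- ===== Notes on version B (the rewrite author's own statement) =====
-- stated objective: alternative
-- what changed: Replaces A's five independent keyword scans of num_cols with a two-stage pipeline: one tagging pass that lowers each column once and computes the set of category names it matches, then a grouping pass that builds each bucket by a set-membership test over the tagged pairs (no substring matching in the grouping stage).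
import Mathlib
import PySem

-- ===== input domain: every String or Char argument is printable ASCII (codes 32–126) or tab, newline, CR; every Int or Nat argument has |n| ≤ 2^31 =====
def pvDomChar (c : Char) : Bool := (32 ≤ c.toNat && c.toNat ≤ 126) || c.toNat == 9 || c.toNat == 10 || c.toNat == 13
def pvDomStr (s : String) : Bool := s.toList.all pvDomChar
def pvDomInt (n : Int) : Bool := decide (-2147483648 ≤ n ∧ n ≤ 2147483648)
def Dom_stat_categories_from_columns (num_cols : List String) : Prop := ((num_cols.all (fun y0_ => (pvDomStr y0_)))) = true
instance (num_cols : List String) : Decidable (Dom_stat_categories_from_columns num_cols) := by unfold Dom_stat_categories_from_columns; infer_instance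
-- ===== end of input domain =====

-- B replaces A's five independent keyword scans with a two-stage pipeline:
-- one tagging pass computing each column's set of matching category names,
-- then per-category grouping by set membership (objective: alternative).

-- ===== PORT A =====
-- A's inner helper `pick`: lowers the keys, then one full comprehension scan of num_cols.
def pvPick (num_cols : List String) (keys : List String) : List String :=
  let keys_low := keys.map PySem.Str.lower
  num_cols.filter (fun c => keys_low.any (fun k => PySem.Str.isIn k (PySem.Str.lower c)))

def stat_categories_from_columns (num_cols : List String) : List (String × List String) :=
  [("Comprehensive", PySem.List.slice num_cols none (some 20)),
   ("Shooting", pvPick num_cols ["shot", "xg", "npxg", "goals", "sca", "gca"]),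
   ("Passing", pvPick num_cols ["pass", "key pass", "assist", "xA", "cross", "prog pass"]),
   ("Possession/Progression", pvPick num_cols ["carry", "progress", "dribble", "touch"]),
   ("Defending", pvPick num_cols ["tackle", "interception", "clearance", "block", "press", "aerial", "duel"]),
   ("Goalkeeping", pvPick num_cols ["save", "keeper", "ga", "psxg"])]

-- ===== PORT B =====
-- Source B's _CATS table (keys already lowercase, as in Source B).
def pvCats : List (String × List String) :=
  [("Shooting", ["shot", "xg", "npxg", "goals", "sca", "gca"]),
   ("Passing", ["pass", "key pass", "assist", "xa", "cross", "prog pass"]),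
   ("Possession/Progression", ["carry", "progress", "dribble", "touch"]),
   ("Defending", ["tackle", "interception", "clearance", "block", "press", "aerial", "duel"]),
   ("Goalkeeping", ["save", "keeper", "ga", "psxg"])]

-- Source B's per-column tag set: {name for name, keys in _CATS if any(k in cl for k in keys)}.
def pvTags (c : String) : PySem.Set String :=
  let cl := PySem.Str.lower c
  PySem.Set.ofList ((pvCats.filter (fun p => p.2.any (fun k => PySem.Str.isIn k cl))).map Prod.fst)

def stat_categories_from_columns_alt (num_cols : List String) : List (String × List String) :=
  let tagged := num_cols.map (fun c => (c, pvTags c))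
  ("Comprehensive", PySem.List.slice num_cols none (some 20)) ::
    pvCats.map (fun p => (p.1, (tagged.filter (fun q => PySem.Set.contains q.2 p.1)).map Prod.fst))

-- ===== PRECONDITION & SPEC =====
def Spec_stat_categories_from_columns (num_cols : List String) (out : List (String × List String)) : Prop := out = stat_categories_from_columns_alt num_cols
instance (num_cols : List String) (out : List (String × List String)) : Decidable (Spec_stat_categories_from_columns num_cols out) := by unfold Spec_stat_categories_from_columns; infer_instance

-- ===== CLAIM (what is proved, stated in full; the proofs are below) =====
def Claim_equal_stat_categories_from_columns : Prop := ∀ (num_cols : List String), Dom_stat_categories_from_columns num_cols → Spec_stat_categories_from_columns num_cols (stat_categories_from_columns num_cols)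

-- ===== LEMMAS AND PROOFS =====

-- Grouping over tagged pairs is a plain filter of the original list.
theorem pv_group_filter (l : List String) (name : String) :
    ((l.map (fun c => (c, pvTags c))).filter (fun q => PySem.Set.contains q.2 name)).map Prod.fst
      = l.filter (fun c => PySem.Set.contains (pvTags c) name) := by
  induction l with
  | nil => rfl
  | cons c cs ih =>
    simp only [List.map_cons, List.filter_cons]
    by_cases h : PySem.Set.contains (pvTags c) name = true
    · rw [if_pos h, if_pos h, List.map_cons, ih]
    · rw [if_neg h, if_neg h, ih]

-- Membership of a category name in a column's tag set is that category's keyword test.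
theorem pv_tags_contains (c : String) (name : String) (keys : List String)
    (hmem : (name, keys) ∈ pvCats) :
    PySem.Set.contains (pvTags c) name
      = keys.any (fun k => PySem.Str.isIn k (PySem.Str.lower c)) := by
  have key : name ∈ (pvCats.filter (fun p => p.2.any (fun k => PySem.Str.isIn k (PySem.Str.lower c)))).map Prod.fst
      ↔ keys.any (fun k => PySem.Str.isIn k (PySem.Str.lower c)) = true := by
    constructor
    · intro hm
      obtain ⟨p, hp, hfst⟩ := List.mem_map.mp hm
      obtain ⟨hpc, hpk⟩ := List.mem_filter.mp hp
      -- the five category names are distinct, so p must be (name, keys)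
      have hpe : p = (name, keys) := by
        fin_cases hmem <;> fin_cases hpc <;> simp_all
      subst hpe
      simpa using hpk
    · intro h
      exact List.mem_map.mpr ⟨(name, keys), List.mem_filter.mpr ⟨hmem, by simpa using h⟩, rfl⟩
  simp only [pvTags, PySem.Set.contains, List.contains_eq_mem, PySem.Set.mem_ofList, key,
    Bool.decide_eq_true]

-- The lowered key lists A computes are exactly Source B's literal lowercase keys.
theorem pv_keys_low :
    (["shot", "xg", "npxg", "goals", "sca", "gca"].map PySem.Str.lower) = ["shot", "xg", "npxg", "goals", "sca", "gca"] ∧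
    (["pass", "key pass", "assist", "xA", "cross", "prog pass"].map PySem.Str.lower) = ["pass", "key pass", "assist", "xa", "cross", "prog pass"] ∧
    (["carry", "progress", "dribble", "touch"].map PySem.Str.lower) = ["carry", "progress", "dribble", "touch"] ∧
    (["tackle", "interception", "clearance", "block", "press", "aerial", "duel"].map PySem.Str.lower) = ["tackle", "interception", "clearance", "block", "press", "aerial", "duel"] ∧
    (["save", "keeper", "ga", "psxg"].map PySem.Str.lower) = ["save", "keeper", "ga", "psxg"] := by
  decide

-- ===== VERDICT (by name: the statement is the Claim_ definition above) =====
theorem stat_categories_from_columns_spec : Claim_equal_stat_categories_from_columns := by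
  intro num_cols _
  unfold Spec_stat_categories_from_columns stat_categories_from_columns stat_categories_from_columns_alt pvPick
  have h1 := fun c => pv_tags_contains c "Shooting" ["shot", "xg", "npxg", "goals", "sca", "gca"] (by decide)
  have h2 := fun c => pv_tags_contains c "Passing" ["pass", "key pass", "assist", "xa", "cross", "prog pass"] (by decide)
  have h3 := fun c => pv_tags_contains c "Possession/Progression" ["carry", "progress", "dribble", "touch"] (by decide)
  have h4 := fun c => pv_tags_contains c "Defending" ["tackle", "interception", "clearance", "block", "press", "aerial", "duel"] (by decide)
  have h5 := fun c => pv_tags_contains c "Goalkeeping" ["save", "keeper", "ga", "psxg"] (by decide)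
  simp only [show pvCats = [("Shooting", ["shot", "xg", "npxg", "goals", "sca", "gca"]),
    ("Passing", ["pass", "key pass", "assist", "xa", "cross", "prog pass"]),
    ("Possession/Progression", ["carry", "progress", "dribble", "touch"]),
    ("Defending", ["tackle", "interception", "clearance", "block", "press", "aerial", "duel"]),
    ("Goalkeeping", ["save", "keeper", "ga", "psxg"])] from rfl,
    List.map_cons, List.map_nil, pv_group_filter, h1, h2, h3, h4, h5,
    pv_keys_low.1, pv_keys_low.2.1, pv_keys_low.2.2.1, pv_keys_low.2.2.2.1, pv_keys_low.2.2.2.2]
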